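-- pv_equiv track=rewrite | github.com/EMCSlabs/Programs | Korean_FA/main/local/evaluateFA.py | divideByType
-- ===== SOURCE A (Python) =====
-- def divideByType(lines):
--     time_init=[]
--     time_end=[]
--     labels=[]
--
--     for i in range(0, len(lines)):
--         if (i+1) % 3 == 1:
--             time_init.append(lines[i])
--         if (i+1) % 3 == 2:
--             time_end.append(lines[i])
--         if (i+1) % 3 == 0:
--             labels.append(lines[i])
--
--     return time_init, time_end, labels
-- ===== SOURCE B (Python) =====
-- def divideByType(lines):
--     return lines[0::3], lines[1::3], lines[2::3]
-- ===== Notes on version B (the rewrite author's own statement) =====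
-- stated objective: idiomatic
-- what changed: The interleaved index-mod loop with three conditional appends is replaced by three strided slices lines[0::3], lines[1::3], lines[2::3] with no loop or branching.
import Mathlib
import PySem

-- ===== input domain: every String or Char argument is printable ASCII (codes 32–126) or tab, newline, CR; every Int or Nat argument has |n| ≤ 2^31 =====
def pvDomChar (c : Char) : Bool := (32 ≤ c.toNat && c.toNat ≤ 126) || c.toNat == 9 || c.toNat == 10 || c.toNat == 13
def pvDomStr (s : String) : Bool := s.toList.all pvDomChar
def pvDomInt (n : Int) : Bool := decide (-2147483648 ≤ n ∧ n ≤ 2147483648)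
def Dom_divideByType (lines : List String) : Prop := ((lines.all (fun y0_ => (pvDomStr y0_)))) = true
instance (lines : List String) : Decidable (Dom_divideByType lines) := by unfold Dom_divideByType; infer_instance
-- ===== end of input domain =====

-- B replaces A's interleaved index-mod loop by three strided slices (idiomatic; no loop).

-- ===== PORT A =====
def divideByType (lines : List String) : List String × List String × List String :=
  (PySem.List.pyRange 0 lines.length 1).foldl
    (fun (acc : List String × List String × List String) i =>
      let acc := if PySem.Int.mod (i + 1) 3 == 1 then
        (acc.1 ++ [PySem.List.pyGetD lines i ""], acc.2.1, acc.2.2) else acc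
      let acc := if PySem.Int.mod (i + 1) 3 == 2 then
        (acc.1, acc.2.1 ++ [PySem.List.pyGetD lines i ""], acc.2.2) else acc
      if PySem.Int.mod (i + 1) 3 == 0 then
        (acc.1, acc.2.1, acc.2.2 ++ [PySem.List.pyGetD lines i ""]) else acc)
    ([], [], [])

-- ===== PORT B =====
def divideByType_alt (lines : List String) : List String × List String × List String :=
  ((PySem.List.slice? lines (some 0) none 3).getD [],
   (PySem.List.slice? lines (some 1) none 3).getD [],
   (PySem.List.slice? lines (some 2) none 3).getD [])

-- ===== PRECONDITION & SPEC =====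
def Spec_divideByType (lines : List String) (out : List String × List String × List String) : Prop := out = divideByType_alt lines
instance (lines : List String) (out : List String × List String × List String) : Decidable (Spec_divideByType lines out) := by unfold Spec_divideByType; infer_instance

-- ===== CLAIM (what is proved, stated in full; the proofs are below) =====
def Claim_equal_divideByType : Prop := ∀ (lines : List String), Dom_divideByType lines → Spec_divideByType lines (divideByType lines)

-- ===== LEMMAS AND PROOFS =====

-- common characterisation of both ports: component j holds the elements at indices j, j+3, j+6, …
def pvM (j : Nat) (xs : List String) : List String :=
  (List.range ((xs.length - j + 2) / 3)).map (fun k => xs.getD (j + 3 * k) "")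

lemma pvMod3 (n : Nat) : PySem.Int.mod ((n : Int) + 1) 3 = (((n + 1) % 3 : Nat) : Int) := by
  rw [PySem.Int.mod, Int.fmod_eq_emod]
  omega

lemma pvSlice_eq (xs : List String) (j : Nat) (hj : j ≤ 2) :
    (PySem.List.slice? xs (some (j : Int)) none 3).getD [] = pvM j xs := by
  unfold PySem.List.slice? PySem.List.sliceIndices
  norm_num
  rw [if_neg (by omega : ¬ ((j : Int) < 0))]
  by_cases h : j < xs.length
  · rw [min_eq_left (by omega), if_pos (by omega)]
    rw [show ((xs.length : Int) - j + 3 - 1) = ((xs.length - j + 2 : Nat) : Int) by omega]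
    rw [show ((xs.length - j + 2 : Nat) : Int) / 3 = (((xs.length - j + 2) / 3 : Nat) : Int) by
      omega, Int.toNat_natCast]
    unfold pvM
    rw [List.filterMap_congr (g := fun k => some (xs.getD (j + 3 * k) ""))]
    · exact congrFun (List.filterMap_eq_map (f := fun k => xs.getD (j + 3 * k) "")) _
    · intro k hk
      simp only [List.mem_range] at hk
      have hlt : j + 3 * k < xs.length := by omega
      rw [show ((j : Int) + 3 * (k : Int)).toNat = j + 3 * k by omega]
      rw [List.getElem?_eq_getElem hlt, List.getD_eq_getElem _ _ hlt]
  · rw [min_eq_right (by omega), if_neg (by omega)]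
    unfold pvM
    rw [show (xs.length - j + 2) / 3 = 0 by omega]
    simp

lemma pvM_append (j : Nat) (hj : j ≤ 2) (xs : List String) (x : String) :
    pvM j (xs ++ [x]) = pvM j xs ++ (if xs.length % 3 = j then [x] else []) := by
  unfold pvM
  simp only [List.length_append, List.length_cons, List.length_nil]
  by_cases h : xs.length % 3 = j
  · rw [if_pos h]
    rw [show (xs.length + 1 - j + 2) / 3 = (xs.length - j + 2) / 3 + 1 by omega]
    rw [List.range_succ, List.map_append, List.map_cons, List.map_nil]
    congr 1
    · apply List.map_congr_left
      intro k hk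
      simp only [List.mem_range] at hk
      exact List.getD_append _ _ _ _ (by omega)
    · congr 1
      rw [show j + 3 * ((xs.length - j + 2) / 3) = xs.length by omega]
      rw [List.getD_eq_getElem _ _ (by simp)]
      simp
  · rw [if_neg h, List.append_nil]
    rw [show (xs.length + 1 - j + 2) / 3 = (xs.length - j + 2) / 3 by omega]
    apply List.map_congr_left
    intro k hk
    simp only [List.mem_range] at hk
    exact List.getD_append _ _ _ _ (by omega)

lemma pvA_char (xs : List String) :
    divideByType xs = (pvM 0 xs, pvM 1 xs, pvM 2 xs) := by
  induction xs using List.reverseRecOn with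
  | nil => decide
  | append_singleton ys x ih =>
    unfold divideByType
    rw [List.length_append, List.length_cons, List.length_nil]
    rw [show ((ys.length + 1 : Nat) : Int) = (ys.length : Int) + 1 by push_cast; ring]
    rw [PySem.List.pyRange_one_succ_right (by positivity)]
    rw [List.foldl_append, List.foldl_cons, List.foldl_nil]
    rw [PySem.List.foldl_congr_mem (g := fun (acc : List String × List String × List String) i =>
      let acc := if PySem.Int.mod (i + 1) 3 == 1 then
        (acc.1 ++ [PySem.List.pyGetD ys i ""], acc.2.1, acc.2.2) else acc
      let acc := if PySem.Int.mod (i + 1) 3 == 2 then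
        (acc.1, acc.2.1 ++ [PySem.List.pyGetD ys i ""], acc.2.2) else acc
      if PySem.Int.mod (i + 1) 3 == 0 then
        (acc.1, acc.2.1, acc.2.2 ++ [PySem.List.pyGetD ys i ""]) else acc)]
    · unfold divideByType at ih
      rw [ih]
      have hx : PySem.List.pyGetD (ys ++ [x]) (ys.length : Int) "" = x := by
        rw [PySem.List.pyGetD_natCast, List.getD_eq_getElem _ _ (by simp)]
        simp
      rw [pvMod3, hx, pvM_append 0 (by omega), pvM_append 1 (by omega), pvM_append 2 (by omega)]
      have h3 : ys.length % 3 = 0 ∨ ys.length % 3 = 1 ∨ ys.length % 3 = 2 := by omega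
      rcases h3 with h | h | h <;>
        simp [show (ys.length + 1) % 3 = (ys.length % 3 + 1) % 3 by omega, h]
    · intro acc i hi
      rw [PySem.List.mem_pyRange_one] at hi
      have hlen : PySem.List.pyGetD (ys ++ [x]) i "" = PySem.List.pyGetD ys i "" := by
        rw [PySem.List.pyGetD_eq_getElem (ys ++ [x]) "" hi.1 (by simp; omega),
            PySem.List.pyGetD_eq_getElem ys "" hi.1 (by omega)]
        exact List.getElem_append_left (by omega)
      simp only [hlen]

lemma pvB_char (xs : List String) :
    divideByType_alt xs = (pvM 0 xs, pvM 1 xs, pvM 2 xs) := by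
  unfold divideByType_alt
  rw [show (0 : Int) = ((0 : Nat) : Int) by norm_num, pvSlice_eq xs 0 (by omega),
      show (1 : Int) = ((1 : Nat) : Int) by norm_num, pvSlice_eq xs 1 (by omega),
      show (2 : Int) = ((2 : Nat) : Int) by norm_num, pvSlice_eq xs 2 (by omega)]

-- ===== VERDICT (by name: the statement is the Claim_ definition above) =====
theorem divideByType_spec : Claim_equal_divideByType := by
  intro lines _
  unfold Spec_divideByType
  rw [pvA_char, pvB_char]
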